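-- pv_equiv track=rewrite | github.com/ocozalp/aoc-2020 | q20.py | construct_tile_graph
-- ===== SOURCE A (Python) =====
-- NO_FLIP = 0
--
-- def construct_tile_graph(lines):
--   result = dict()
--   tiles = dict()
--   current_id = -1
--   img = list()
--   for line in lines:
--     if line == '':
--       result[current_id] = create_node(img, current_id)
--       tiles[current_id] = img
--       current_id = -1
--       img = list()
--     elif line.startswith('Tile'):
--       current_id = int(line[5:-1])
--     else:
--       img.append(line)
--
--   return result, tiles
--
-- def r(s):
--   return ''.join(reversed(s))
--
-- def create_node(img, tile_id):
--   north = img[0]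
--   north_r = r(north)
--   south = img[-1]
--   south_r = r(south)
--   west = ''.join([row[0] for row in img])
--   west_r = r(west)
--   east = ''.join([row[-1] for row in img])
--   east_r = r(east)
--
--   variations = [
--     (north, east, south, west, tile_id, 0, NO_FLIP),  # original
--     (west_r, north, east_r, south, tile_id, 1, NO_FLIP),  # ->
--     (south_r, west_r, north_r, east_r, tile_id, 2, NO_FLIP),  # -> ->
--     (east, south_r, west, north_r, tile_id, 3, NO_FLIP)  # -> -> ->
--   ]
--
--   return variations
-- ===== SOURCE B (Python) =====
-- NO_FLIP = 0
--
--
-- def construct_tile_graph(lines):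
--   # Block decomposition: repeatedly cut off the segment before the next ''
--   # separator (the trailing unterminated segment is never processed).
--   result = {}
--   tiles = {}
--   rest = lines
--   while '' in rest:
--     cut = rest.index('')
--     block, rest = rest[:cut], rest[cut + 1:]
--     tile_lines = [l for l in block if l.startswith('Tile')]
--     current_id = int(tile_lines[-1][5:-1]) if tile_lines else -1
--     img = [l for l in block if not l.startswith('Tile')]
--     result[current_id] = create_node(img, current_id)
--     tiles[current_id] = img
--   return result, tiles
--
--
-- def r(s):
--   return ''.join(reversed(s))
--
--
-- def create_node(img, tile_id):
--   north = img[0]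
--   north_r = r(north)
--   south = img[-1]
--   south_r = r(south)
--   west = ''.join([row[0] for row in img])
--   west_r = r(west)
--   east = ''.join([row[-1] for row in img])
--   east_r = r(east)
--
--   variations = [
--     (north, east, south, west, tile_id, 0, NO_FLIP),
--     (west_r, north, east_r, south, tile_id, 1, NO_FLIP),
--     (south_r, west_r, north_r, east_r, tile_id, 2, NO_FLIP),
--     (east, south_r, west, north_r, tile_id, 3, NO_FLIP)
--   ]
--
--   return variations
-- ===== Notes on version B (the rewrite author's own statement) =====
-- stated objective: alternative
-- what changed: A makes one streaming pass with mutable reset-state (current_id/img cleared at every '' line); B repeatedly cuts the input at the next '' separator and processes each terminated block independently (img and the last-'Tile' id via list comprehensions over the block), naturally dropping the trailing unterminated segment.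
import Mathlib
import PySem

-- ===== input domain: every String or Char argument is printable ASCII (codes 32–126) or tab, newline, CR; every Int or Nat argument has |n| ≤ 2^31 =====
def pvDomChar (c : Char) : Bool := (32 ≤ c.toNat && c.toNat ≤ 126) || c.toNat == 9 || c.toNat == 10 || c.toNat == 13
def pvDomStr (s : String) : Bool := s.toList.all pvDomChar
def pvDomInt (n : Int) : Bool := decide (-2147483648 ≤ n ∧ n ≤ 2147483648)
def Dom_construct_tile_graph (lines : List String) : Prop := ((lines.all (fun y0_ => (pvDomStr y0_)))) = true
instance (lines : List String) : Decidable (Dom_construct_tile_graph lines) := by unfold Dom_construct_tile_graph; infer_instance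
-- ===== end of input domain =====

-- B replaces A's single streaming pass with mutable reset-state by a block decomposition:
-- cut the input at each '' separator and process each terminated block independently (same
-- return value; same helpers r/create_node).

abbrev TGVal := List (String × String × String × String × Int × Int × Int)

-- shared helpers (Python helpers r / create_node, identical in both modules)
def tg_r (s : String) : String := String.ofList s.toList.reverse

-- int(line[5:-1]); .getD 0 stands for the ValueError site, excluded by Pre_
def tg_parse (line : String) : Int :=
  (PySem.Int.ofStr? (PySem.Str.slice line (some 5) (some (-1)))).getD 0

-- create_node: the defaults "" / ' ' stand for the IndexError sites img[0]/img[-1]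
-- (empty img is excluded by Pre_; rows are never '' by construction of the caller)
def tg_create_node (img : List String) (tile_id : Int) : TGVal :=
  let north := PySem.List.pyGetD img 0 ""
  let north_r := tg_r north
  let south := PySem.List.pyGetD img (-1) ""
  let south_r := tg_r south
  let west := String.ofList (img.map (fun row => (PySem.Str.pyGet? row 0).getD ' '))
  let west_r := tg_r west
  let east := String.ofList (img.map (fun row => (PySem.Str.pyGet? row (-1)).getD ' '))
  let east_r := tg_r east
  [(north, east, south, west, tile_id, 0, 0),
   (west_r, north, east_r, south, tile_id, 1, 0),
   (south_r, west_r, north_r, east_r, tile_id, 2, 0),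
   (east, south_r, west, north_r, tile_id, 3, 0)]

-- ===== PORT A =====
def tg_stepA (st : PySem.Dict Int TGVal × PySem.Dict Int (List String) × Int × List String)
    (line : String) : PySem.Dict Int TGVal × PySem.Dict Int (List String) × Int × List String :=
  match st with
  | (result, tiles, current_id, img) =>
    if line = "" then
      (result.insert current_id (tg_create_node img current_id), tiles.insert current_id img,
       -1, [])
    else if PySem.Str.startswith line "Tile" then
      (result, tiles, tg_parse line, img)
    else
      (result, tiles, current_id, img ++ [line])

def construct_tile_graph (lines : List String) : (List (Int × List (String × String × String × String × Int × Int × Int))) × (List (Int × List String)) :=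
  let st := lines.foldl tg_stepA (PySem.Dict.empty, PySem.Dict.empty, -1, ([] : List String))
  (st.1.items, st.2.1.items)

-- ===== PORT B =====
-- the while loop is encoded with a fuel counter bounded by the list length
-- (each iteration removes at least one element of `rest`)
def tg_altGo (fuel : Nat) (result : PySem.Dict Int TGVal) (tiles : PySem.Dict Int (List String))
    (rest : List String) :
    (List (Int × List (String × String × String × String × Int × Int × Int))) × (List (Int × List String)) :=
  match fuel with
  | 0 => (result.items, tiles.items)
  | fuel + 1 =>
    match PySem.List.index? rest "" with
    | none => (result.items, tiles.items)
    | some cut =>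
        let block := PySem.List.slice rest none (some (cut : Int))
        let rest' := PySem.List.slice rest (some ((cut : Int) + 1)) none
        let tile_lines := block.filter (fun l => PySem.Str.startswith l "Tile")
        let current_id : Int := match tile_lines.getLast? with
          | some t => tg_parse t
          | none => -1
        let img := block.filter (fun l => ! PySem.Str.startswith l "Tile")
        tg_altGo fuel (result.insert current_id (tg_create_node img current_id))
          (tiles.insert current_id img) rest'

def construct_tile_graph_alt (lines : List String) : (List (Int × List (String × String × String × String × Int × Int × Int))) × (List (Int × List String)) :=
  tg_altGo lines.length PySem.Dict.empty PySem.Dict.empty lines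

-- ===== PRECONDITION & SPEC =====
-- Pre_ = exactly the inputs on which the Python A returns: every 'Tile'-prefixed line's id
-- slice parses as an int (else int() raises ValueError), and every ''-terminated block has
-- at least one non-'Tile' line (else create_node raises IndexError on img[0]).
def Pre_construct_tile_graph (lines : List String) : Prop :=
  (∀ l ∈ lines, PySem.Str.startswith l "Tile" = true →
      (PySem.Int.ofStr? (PySem.Str.slice l (some 5) (some (-1)))).isSome = true) ∧
  (∀ b ∈ (List.splitOn "" lines).dropLast,
      b.filter (fun l => ! PySem.Str.startswith l "Tile") ≠ [])
instance (lines : List String) : Decidable (Pre_construct_tile_graph lines) := by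
  unfold Pre_construct_tile_graph; infer_instance

def pvWitness_construct_tile_graph : List String := ["Tile 7:", "ab", "cd", ""]

def Spec_construct_tile_graph (lines : List String) (out : (List (Int × List (String × String × String × String × Int × Int × Int))) × (List (Int × List String))) : Prop := out = construct_tile_graph_alt lines
instance (lines : List String) (out : (List (Int × List (String × String × String × String × Int × Int × Int))) × (List (Int × List String))) : Decidable (Spec_construct_tile_graph lines out) := by
  unfold Spec_construct_tile_graph
  haveI d7 : DecidableEq (String × String × String × String × Int × Int × Int) :=
    instDecidableEqProd
  haveI dL : DecidableEq (List (Int × List (String × String × String × String × Int × Int × Int))) :=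
    @instDecidableEqList _ (@instDecidableEqProd _ _ _ (@instDecidableEqList _ d7))
  haveI dR : DecidableEq (List (Int × List String)) :=
    @instDecidableEqList _ (@instDecidableEqProd _ _ _ (@instDecidableEqList _ instDecidableEqString))
  exact @instDecidableEqProd _ _ dL dR out (construct_tile_graph_alt lines)

-- ===== CLAIM (what is proved, stated in full; the proofs are below) =====
def Claim_equal_construct_tile_graph : Prop := ∀ (lines : List String), Dom_construct_tile_graph lines → Pre_construct_tile_graph lines → Spec_construct_tile_graph lines (construct_tile_graph lines)


-- ===== LEMMAS AND PROOFS =====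

lemma tg_foldA_no_sep (xs : List String) (hx : "" ∉ xs) :
    ∀ (res : PySem.Dict Int TGVal) (tiles : PySem.Dict Int (List String)) (c : Int)
      (img : List String),
    List.foldl tg_stepA (res, tiles, c, img) xs =
      (res, tiles,
       xs.foldl (fun c l => if PySem.Str.startswith l "Tile" then tg_parse l else c) c,
       img ++ xs.filter (fun l => ! PySem.Str.startswith l "Tile")) := by
  induction xs with
  | nil => intro res tiles c img; simp
  | cons x xs ih =>
    intro res tiles c img
    have hx0 : ¬ x = "" := by
      intro hh; exact hx (hh ▸ List.mem_cons_self)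
    have hxs : "" ∉ xs := fun hh => hx (List.mem_cons_of_mem _ hh)
    have hstep : tg_stepA (res, tiles, c, img) x =
        if PySem.Str.startswith x "Tile" then (res, tiles, tg_parse x, img)
        else (res, tiles, c, img ++ [x]) := by
      simp [tg_stepA, hx0]
    rw [List.foldl_cons, hstep]
    by_cases ht : PySem.Str.startswith x "Tile" = true
    · simp only [ht, if_true, ih hxs, List.foldl_cons, List.filter_cons,
        Bool.not_true, Bool.false_eq_true, if_false]
    · simp only [ht, ih hxs, List.foldl_cons, List.filter_cons] at *
      simp [List.append_assoc]

lemma tg_cid_eq (xs : List String) :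
    ∀ c : Int,
    xs.foldl (fun c l => if PySem.Str.startswith l "Tile" then tg_parse l else c) c =
      (match (xs.filter (fun l => PySem.Str.startswith l "Tile")).getLast? with
       | some t => tg_parse t
       | none => c) := by
  induction xs with
  | nil => intro c; rfl
  | cons x xs ih =>
    intro c
    rw [List.foldl_cons, List.filter_cons]
    by_cases ht : PySem.Str.startswith x "Tile" = true
    · rw [if_pos ht, if_pos ht, ih]
      rcases hl : xs.filter (fun l => PySem.Str.startswith l "Tile") with _ | ⟨b, l'⟩
      · simp
      · cases hg : (b :: l').getLast? with
        | none => exact absurd (List.getLast?_eq_none_iff.1 hg) (by simp)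
        | some t => simp [hg]
    · rw [if_neg ht, if_neg ht, ih]

lemma tg_main : ∀ (fuel : Nat) (rest : List String), rest.length ≤ fuel →
    ∀ (res : PySem.Dict Int TGVal) (tiles : PySem.Dict Int (List String)),
    ((List.foldl tg_stepA (res, tiles, -1, ([] : List String)) rest).1.items,
     (List.foldl tg_stepA (res, tiles, -1, ([] : List String)) rest).2.1.items) =
      tg_altGo fuel res tiles rest := by
  intro fuel
  induction fuel with
  | zero =>
    intro rest hn res tiles
    have : rest = [] := List.eq_nil_of_length_eq_zero (Nat.le_zero.mp hn)
    subst this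
    rfl
  | succ fuel ih =>
    intro rest hn res tiles
    cases h : PySem.List.index? rest "" with
    | none =>
      have hmem : "" ∉ rest := (PySem.List.index?_eq_none_iff rest "").1 h
      rw [tg_foldA_no_sep rest hmem]
      simp only [tg_altGo, h]
    | some cut =>
      obtain ⟨pre, suf, hrest, hlen, hpre⟩ := (PySem.List.index?_eq_some_iff rest "" cut).1 h
      subst hrest
      have hlt : suf.length ≤ fuel := by
        simp [List.length_append] at hn; omega
      have hblock : PySem.List.slice (pre ++ "" :: suf) none (some (cut : Int)) = pre := by
        rw [PySem.List.slice_to_natCast, ← hlen, List.take_left]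
      have hrest' : PySem.List.slice (pre ++ "" :: suf) (some ((cut : Int) + 1)) none = suf := by
        have hc : ((cut : Int) + 1) = (((cut + 1 : Nat)) : Int) := by push_cast; ring
        rw [hc, PySem.List.slice_from_natCast, ← hlen,
          show pre ++ "" :: suf = (pre ++ [""]) ++ suf by simp,
          show pre.length + 1 = (pre ++ [""]).length by simp,
          List.drop_left]
      have hstepE : ∀ (c : Int) (i : List String),
          tg_stepA (res, tiles, c, i) "" =
            (res.insert c (tg_create_node i c), tiles.insert c i, -1, []) := by
        intro c i; simp [tg_stepA]
      rw [List.foldl_append, tg_foldA_no_sep pre hpre, List.foldl_cons, hstepE,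
        ih suf hlt]
      simp only [tg_altGo, h, hblock, hrest', tg_cid_eq, List.nil_append]

lemma tg_eq (lines : List String) :
    construct_tile_graph lines = construct_tile_graph_alt lines := by
  unfold construct_tile_graph construct_tile_graph_alt
  exact tg_main lines.length lines le_rfl _ _

-- ===== VERDICT (by name: the statement is the Claim_ definition above) =====
theorem construct_tile_graph_spec : Claim_equal_construct_tile_graph := by
  intro lines _ _
  unfold Spec_construct_tile_graph
  exact tg_eq lines
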